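-- pv_equiv track=rewrite | github.com/monistode/assembler | monistode_assembler/arguments/immediate.py | _attempt_scan_chars
-- ===== SOURCE A (Python) =====
-- def _attempt_scan_chars(line: str, offset: int) -> int | None:
--     """Attempt to scan a sequence of characters from the line
--
--     Args:
--         line (str): The line to parse
--         offset (int): The offset to start parsing from
--
--     Returns:
--         int | None: The length of the sequence in characters, or None if the
--             line does not contain the sequence
--     """
--     # in format 'chars' or "chars"
--     if line[offset] not in ('"', "'"):
--         return None
--     opening_quote = line[offset]
--     offset += 1
--     while offset < len(line) and line[offset] != opening_quote:
--         if line[offset] == "\\":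
--             offset += 2
--         else:
--             offset += 1
--     if offset >= len(line):
--         return None
--     return offset
-- ===== SOURCE B (Python) =====
-- def _attempt_scan_chars(line: str, offset: int) -> int | None:
--     """Scan a quoted char sequence; return the index of the closing quote, or None."""
--     quote = line[offset]
--     if quote not in ('"', "'"):
--         return None
--     pos = offset + 1
--     while True:
--         j = line.find(quote, pos)
--         if j == -1:
--             return None
--         k = j
--         while k > pos and line[k - 1] == "\\":
--             k -= 1
--         if (j - k) % 2 == 0:
--             return j
--         pos = j + 1
-- ===== Notes on version B (the rewrite author's own statement) =====
-- stated objective: alternative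
-- what changed: B replaces A's char-by-char escape-skipping scan with an outer str.find loop over candidate closing quotes plus a backward count of the backslashes immediately preceding each candidate (run parity decides whether the candidate is escaped).
-- outside the precondition, e.g. on _attempt_scan_chars('""', -2): A returns -1, B returns 1; on _attempt_scan_chars('ab', -2): A returns None, B returns None
import Mathlib
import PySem

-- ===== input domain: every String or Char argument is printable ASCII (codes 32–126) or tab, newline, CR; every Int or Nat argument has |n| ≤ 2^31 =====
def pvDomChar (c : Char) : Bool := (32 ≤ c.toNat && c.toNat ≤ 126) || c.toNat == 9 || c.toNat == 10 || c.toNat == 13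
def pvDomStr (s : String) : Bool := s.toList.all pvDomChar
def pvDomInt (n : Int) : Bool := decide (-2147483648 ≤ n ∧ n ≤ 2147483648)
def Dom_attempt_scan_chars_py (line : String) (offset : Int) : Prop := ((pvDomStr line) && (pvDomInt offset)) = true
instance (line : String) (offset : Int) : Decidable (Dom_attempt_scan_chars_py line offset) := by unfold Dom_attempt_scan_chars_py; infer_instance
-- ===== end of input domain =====

-- B replaces A's char-by-char escape-skipping scan by an outer loop over candidate closing
-- quotes (str.find) plus a backward count of the immediately preceding backslashes
-- (alternative decomposition, similar cost).

-- ===== PORT A =====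
-- the while loop of A: advance offset past escaped chars until the closing quote or the end.
-- Structural recursion on a fuel that bounds the number of iterations (offset grows by ≥ 1 per
-- step and the loop stops once offset ≥ len, so (len + 1 - offset).toNat iterations suffice);
-- with fuel 0 the guard offset < len is false anyway, so the fuel changes nothing.
def aScanGo (cs : List Char) (q : Char) : Nat → Int → Int
  | 0, offset => offset
  | fuel + 1, offset =>
    if offset < (cs.length : Int) then
      -- line[offset]: in range on every state reachable from attempt_scan_chars_py under Pre_
      let c := PySem.List.pyGetD cs offset ' '
      if c = q then offset
      else if c = '\\' then aScanGo cs q fuel (offset + 2)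
      else aScanGo cs q fuel (offset + 1)
    else offset

def aScanLoop (cs : List Char) (q : Char) (offset : Int) : Int :=
  aScanGo cs q ((cs.length : Int) + 1 - offset).toNat offset

def attempt_scan_chars_py (line : String) (offset : Int) : Option Int :=
  match PySem.Str.pyGet? line offset with
  | none => none  -- line[offset] raises IndexError: excluded by Pre_
  | some c =>
    if ¬(c = '"' ∨ c = '\'') then none
    else
      let r := aScanLoop line.toList c (offset + 1)
      if (line.toList.length : Int) ≤ r then none else some r

-- ===== PORT B =====

-- inner while of B: walk back over the backslashes immediately before index k (down to pos).
-- Structural recursion on fuel = (k - pos).toNat, the exact number of possible decrements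
-- (with fuel 0 we have k ≤ pos and the guard pos < k is false anyway).
def bRunGo (cs : List Char) : Nat → Int → Int → Int
  | 0, _, k => k
  | fuel + 1, pos, k =>
    if pos < k ∧ PySem.List.pyGet? cs (k - 1) = some '\\' then bRunGo cs fuel pos (k - 1) else k

def bRun (cs : List Char) (pos : Int) (k : Int) : Int :=
  bRunGo cs (k - pos).toNat pos k

-- outer while True of B: try each occurrence of the quote in turn.
-- Structural recursion on a fuel bounding the number of find calls: each hit j satisfies
-- pos ≤ j < len and the loop restarts at j + 1, so (len + 1 - pos).toNat rounds suffice; with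
-- fuel 0 we have pos > len, where find returns -1 and the loop stops with None anyway.
def bFindGo (cs : List Char) (q : Char) : Nat → Int → Option Int
  | 0, _ => none
  | fuel + 1, pos =>
    let j := PySem.Chars.findFrom cs [q] pos none
    if j = -1 then none
    else
      let k := bRun cs pos j
      if PySem.Int.mod (j - k) 2 = 0 then some j
      else bFindGo cs q fuel (j + 1)

def bFindLoop (cs : List Char) (q : Char) (pos : Int) : Option Int :=
  bFindGo cs q ((cs.length : Int) + 1 - pos).toNat pos

def attempt_scan_chars_py_alt (line : String) (offset : Int) : Option Int :=
  match PySem.Str.pyGet? line offset with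
  | none => none  -- line[offset] raises IndexError: excluded by Pre_
  | some q =>
    if ¬(q = '"' ∨ q = '\'') then none
    else bFindLoop line.toList q (offset + 1)

-- ===== PRECONDITION & SPEC =====
-- Pre_ excludes (a) out-of-range offsets, where line[offset] raises IndexError in both programs,
-- and (b) offsets ≤ -2, which A accepts via Python's negative-index wraparound and then keeps
-- scanning with negative indices across the end of the string, returning a negative index (or one
-- found by re-reading the line from the start) — an artefact no forward scanner can match and no
-- caller of this forward parser passes; B's find-based search returns the normalized nonnegative
-- index (or None) there.
def Pre_attempt_scan_chars_py (line : String) (offset : Int) : Prop :=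
  PySem.Raise.InRange line.toList.length offset ∧ -1 ≤ offset
instance (line : String) (offset : Int) : Decidable (Pre_attempt_scan_chars_py line offset) := by
  unfold Pre_attempt_scan_chars_py; infer_instance

def pvWitness_attempt_scan_chars_py : String × Int := ("'ab'", 0)

def Spec_attempt_scan_chars_py (line : String) (offset : Int) (out : Option Int) : Prop :=
  out = attempt_scan_chars_py_alt line offset
instance (line : String) (offset : Int) (out : Option Int) : Decidable (Spec_attempt_scan_chars_py line offset out) := by
  unfold Spec_attempt_scan_chars_py; infer_instance

-- ===== CLAIM (what is proved, stated in full; the proofs are below) =====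
def Claim_equal_attempt_scan_chars_py : Prop := ∀ (line : String) (offset : Int), Dom_attempt_scan_chars_py line offset → Pre_attempt_scan_chars_py line offset → Spec_attempt_scan_chars_py line offset (attempt_scan_chars_py line offset)

-- ===== LEMMAS AND PROOFS =====

theorem singleton_infix_iff_mem (q : Char) (l : List Char) : [q] <:+: l ↔ q ∈ l := by
  constructor
  · intro h; exact h.subset (by simp)
  · intro h; rcases List.append_of_mem h with ⟨l1, l2, rfl⟩
    exact ⟨l1, l2, by simp⟩

theorem singleton_prefix_iff_getElem (q : Char) (l : List Char) : [q] <+: l ↔ l[0]? = some q := by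
  cases l with
  | nil => simp
  | cons a t => constructor
                · rintro ⟨u, hu⟩; simp at hu; simp [hu.1]
                · intro h; simp at h; exact ⟨t, by simp [h]⟩

-- a hit of line.find(q, pos) lies in (pos-1, len)
theorem findFrom_single_bounds (cs : List Char) (q : Char) (pos : Int)
    (hne : PySem.Chars.findFrom cs [q] pos none ≠ -1) :
    pos < PySem.Chars.findFrom cs [q] pos none + 1 ∧
    PySem.Chars.findFrom cs [q] pos none + 1 ≤ (cs.length : Int) := by
  have heq : PySem.Chars.findFrom cs [q] pos none =
      (if (cs.length : Int) < (if pos < 0 then if pos + (cs.length : Int) < 0 then 0 else pos + (cs.length : Int) else pos) then -1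
       else
        if PySem.Chars.find (List.drop (if pos < 0 then if pos + (cs.length : Int) < 0 then 0 else pos + (cs.length : Int) else pos).toNat (List.take ((cs.length : Int)).toNat cs)) [q] = -1 then -1
        else (if pos < 0 then if pos + (cs.length : Int) < 0 then 0 else pos + (cs.length : Int) else pos) +
          PySem.Chars.find (List.drop (if pos < 0 then if pos + (cs.length : Int) < 0 then 0 else pos + (cs.length : Int) else pos).toNat (List.take ((cs.length : Int)).toNat cs)) [q]) := rfl
  rw [heq] at hne ⊢
  clear heq
  generalize hstdef : (if pos < 0 then if pos + (cs.length : Int) < 0 then 0 else pos + (cs.length : Int) else pos) = st at *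
  have hst0 : (st = pos ∧ 0 ≤ pos) ∨ (0 ≤ st ∧ pos < 0) := by split_ifs at hstdef <;> omega
  by_cases hlt : (cs.length : Int) < st
  · simp [hlt] at hne
  · rw [if_neg hlt] at hne ⊢
    generalize hrdef : PySem.Chars.find (List.drop st.toNat (List.take ((cs.length:Int)).toNat cs)) [q] = r at *
    by_cases hr1 : r = -1
    · simp [hr1] at hne
    · rw [if_neg hr1] at hne ⊢
      have hrpos : 0 ≤ r := by
        have := PySem.Chars.neg_one_le_find (List.drop st.toNat (List.take ((cs.length:Int)).toNat cs)) [q]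
        omega
      have hspec := PySem.Chars.find_spec (s := List.drop st.toNat (List.take ((cs.length:Int)).toNat cs)) (sub := [q]) (by omega)
      rw [hrdef] at hspec
      have hlen : r.toNat < (List.drop st.toNat (List.take ((cs.length:Int)).toNat cs)).length := by
        rcases hspec.1 with ⟨t, ht⟩
        have h2 := congrArg List.length ht
        simp at h2
        simp only [List.length_drop, List.length_take]
        omega
      simp at hlen
      omega

theorem aScanGo_stop (cs : List Char) (q : Char) (f : Nat) (s : Int)
    (h : (cs.length : Int) ≤ s) : aScanGo cs q f s = s := by
  cases f with
  | zero => rfl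
  | succ f => simp only [aScanGo]; rw [if_neg (by omega)]

theorem aScanGo_fuel (cs : List Char) (q : Char) :
    ∀ (f1 f2 : Nat) (s : Int), ((cs.length : Int) + 1 - s).toNat ≤ f1 →
    ((cs.length : Int) + 1 - s).toNat ≤ f2 → aScanGo cs q f1 s = aScanGo cs q f2 s := by
  intro f1
  induction f1 with
  | zero =>
    intro f2 s h1 h2
    rw [aScanGo_stop _ _ _ _ (by omega), aScanGo_stop _ _ _ _ (by omega)]
  | succ f ih =>
    intro f2 s h1 h2
    by_cases hs : (cs.length : Int) ≤ s
    · rw [aScanGo_stop _ _ _ _ hs, aScanGo_stop _ _ _ _ hs]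
    · cases f2 with
      | zero => omega
      | succ g =>
        simp only [aScanGo]
        simp only [if_pos (show s < (cs.length : Int) from by omega)]
        by_cases h1q : PySem.List.pyGetD cs s ' ' = q
        · simp only [if_pos h1q]
        · simp only [if_neg h1q]
          by_cases hbs : PySem.List.pyGetD cs s ' ' = '\\'
          · simp only [if_pos hbs]; exact ih g (s + 2) (by omega) (by omega)
          · simp only [if_neg hbs]; exact ih g (s + 1) (by omega) (by omega)

theorem aScan_stop (cs : List Char) (q : Char) (s : Int) (h : (cs.length : Int) ≤ s) :
    aScanLoop cs q s = s := by
  unfold aScanLoop; exact aScanGo_stop _ _ _ _ h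

theorem aScan_step (cs : List Char) (q : Char) (s : Int) (h : s < (cs.length : Int)) :
    aScanLoop cs q s = (if PySem.List.pyGetD cs s ' ' = q then s
      else if PySem.List.pyGetD cs s ' ' = '\\' then aScanLoop cs q (s + 2)
      else aScanLoop cs q (s + 1)) := by
  unfold aScanLoop
  obtain ⟨f, hf⟩ : ∃ f, ((cs.length : Int) + 1 - s).toNat = f + 1 :=
    ⟨((cs.length : Int) - s).toNat, by omega⟩
  rw [hf]
  simp only [aScanGo]
  rw [if_pos h]
  by_cases h1q : PySem.List.pyGetD cs s ' ' = q
  · simp only [if_pos h1q]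
  · simp only [if_neg h1q]
    by_cases hbs : PySem.List.pyGetD cs s ' ' = '\\'
    · simp only [if_pos hbs]
      exact aScanGo_fuel cs q f (((cs.length : Int) + 1 - (s + 2)).toNat) (s + 2) (by omega) (by omega)
    · simp only [if_neg hbs]
      exact aScanGo_fuel cs q f (((cs.length : Int) + 1 - (s + 1)).toNat) (s + 1) (by omega) (by omega)

theorem bRun_stop (cs : List Char) (pos k : Int) (h : k ≤ pos) : bRun cs pos k = k := by
  unfold bRun; rw [show (k - pos).toNat = 0 by omega]; rfl

theorem bRun_step (cs : List Char) (pos k : Int) (h : pos < k) :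
    bRun cs pos k = (if PySem.List.pyGet? cs (k - 1) = some '\\' then bRun cs pos (k - 1) else k) := by
  unfold bRun
  obtain ⟨f, hf⟩ : ∃ f, (k - pos).toNat = f + 1 := ⟨(k - 1 - pos).toNat, by omega⟩
  rw [hf, show (k - 1 - pos).toNat = f by omega]
  simp only [bRunGo]
  by_cases hbs : PySem.List.pyGet? cs (k - 1) = some '\\'
  · rw [if_pos ⟨h, hbs⟩, if_pos hbs]
  · rw [if_neg (fun hc => hbs hc.2), if_neg hbs]

theorem bFindGo_none (cs : List Char) (q : Char) (pos : Int)
    (h : PySem.Chars.findFrom cs [q] pos none = -1) : ∀ f, bFindGo cs q f pos = none := by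
  intro f
  cases f with
  | zero => rfl
  | succ f => simp only [bFindGo]; rw [if_pos h]

theorem aScan_noquote (cs : List Char) (q : Char) (s : Nat)
    (h : ∀ i : Nat, s ≤ i → i < cs.length → cs[i]? ≠ some q) :
    (cs.length : Int) ≤ aScanLoop cs q (s : Int) := by
  by_cases hs : cs.length ≤ s
  · rw [aScan_stop cs q s (by omega)]; omega
  · rw [not_le] at hs
    rw [aScan_step _ _ _ (by omega)]
    have hg : PySem.List.pyGetD cs (s : Int) ' ' = cs[s] := by simp [List.getD, List.getElem?_eq_getElem hs]
    simp only [hg]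
    rw [if_neg (by intro hc; exact h s le_rfl hs (by simp [List.getElem?_eq_getElem hs, hc]))]
    by_cases hbs : cs[s] = '\\'
    · rw [if_pos hbs]
      have : ((s : Int) + 2) = ((s + 2 : Nat) : Int) := by push_cast; ring
      rw [this]
      exact aScan_noquote cs q (s + 2) (fun i h1 h2 => h i (by omega) h2)
    · rw [if_neg hbs]
      have : ((s : Int) + 1) = ((s + 1 : Nat) : Int) := by push_cast; ring
      rw [this]
      exact aScan_noquote cs q (s + 1) (fun i h1 h2 => h i (by omega) h2)
termination_by cs.length - s

theorem aScan_reach (cs : List Char) (q : Char) (p k : Nat) (hpk : p ≤ k) (hkl : k ≤ cs.length)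
    (hnq : ∀ i : Nat, p ≤ i → i < k → cs[i]? ≠ some q)
    (hlast : k = p ∨ cs[k - 1]? ≠ some '\\') :
    aScanLoop cs q (p : Int) = aScanLoop cs q (k : Int) := by
  by_cases hpe : p = k
  · rw [hpe]
  · have hplt : p < k := by omega
    have hpl : p < cs.length := by omega
    rw [aScan_step _ _ _ (by omega)]
    have hg : PySem.List.pyGetD cs (p : Int) ' ' = cs[p] := by simp [List.getD, List.getElem?_eq_getElem hpl]
    simp only [hg]
    rw [if_neg (by intro hc; exact hnq p le_rfl hplt (by simp [List.getElem?_eq_getElem hpl, hc]))]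
    by_cases hbs : cs[p] = '\\'
    · rw [if_pos hbs]
      have hp2 : p + 2 ≤ k := by
        rcases hlast with h1 | h1
        · omega
        · by_contra hcon
          have : p = k - 1 := by omega
          exact h1 (by subst this; simp [hpl, hbs])
      have : ((p : Int) + 2) = ((p + 2 : Nat) : Int) := by push_cast; ring
      rw [this]
      exact aScan_reach cs q (p + 2) k hp2 hkl (fun i h1 h2 => hnq i (by omega) h2)
        (Or.inr (hlast.resolve_left (by omega)))
    · rw [if_neg hbs]
      have : ((p : Int) + 1) = ((p + 1 : Nat) : Int) := by push_cast; ring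
      rw [this]
      exact aScan_reach cs q (p + 1) k (by omega) hkl (fun i h1 h2 => hnq i (by omega) h2)
        (Or.inr (hlast.resolve_left (by omega)))
termination_by k - p

theorem aScan_run (cs : List Char) (q : Char) (hq : q ≠ '\\') (k j : Nat) (hkj : k ≤ j)
    (hbs : ∀ i : Nat, k ≤ i → i < j → cs[i]? = some '\\') (hquote : cs[j]? = some q) :
    (if (j - k) % 2 = 0 then aScanLoop cs q (k : Int) = (j : Int)
     else aScanLoop cs q (k : Int) = aScanLoop cs q ((j : Int) + 1)) := by
  have hjl : j < cs.length := by
    by_contra hcon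
    rw [List.getElem?_eq_none (by omega)] at hquote
    simp at hquote
  by_cases hke : k = j
  · subst hke
    rw [if_pos (show (k - k) % 2 = 0 by omega)]
    have hkl : k < cs.length := by omega
    rw [aScan_step _ _ _ (by omega)]
    have hkv : cs[k] = q := by
      have := hquote; rw [List.getElem?_eq_getElem hkl] at this; exact Option.some.inj this
    have hg : PySem.List.pyGetD cs (k : Int) ' ' = cs[k] := by simp [List.getD, List.getElem?_eq_getElem hkl]
    simp only [hg]
    rw [if_pos hkv]
  · have hklt : k < j := by omega
    have hkbs : cs[k]? = some '\\' := hbs k le_rfl hklt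
    have hkl : k < cs.length := by omega
    have hkv : cs[k] = '\\' := by
      have := hkbs; rw [List.getElem?_eq_getElem hkl] at this; exact Option.some.inj this
    have hstep : aScanLoop cs q (k : Int) = aScanLoop cs q ((k : Int) + 2) := by
      rw [aScan_step _ _ _ (by omega)]
      have hg : PySem.List.pyGetD cs (k : Int) ' ' = cs[k] := by simp [List.getD, List.getElem?_eq_getElem hkl]
      simp only [hg]
      rw [if_neg (by rw [hkv]; intro hc; exact hq hc.symm), if_pos hkv]
    by_cases hj1 : j = k + 1
    · subst hj1
      simp only [Nat.add_sub_cancel_left]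
      norm_num
      rw [hstep]
      have : ((k : Int) + 2) = ((k : Int) + 1 + 1) := by ring
      rw [this]
    · have hk2 : k + 2 ≤ j := by omega
      have hrec := aScan_run cs q hq (k + 2) j hk2 (fun i h1 h2 => hbs i (by omega) h2) hquote
      have hcast : ((k + 2 : Nat) : Int) = (k : Int) + 2 := by push_cast; ring
      have hpar : (j - k) % 2 = (j - (k + 2)) % 2 := by omega
      rw [hpar]
      split_ifs with hpe
      · rw [if_pos hpe] at hrec
        rw [hstep, ← hcast, hrec]
      · rw [if_neg hpe] at hrec
        rw [hstep, ← hcast, hrec]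
termination_by j - k

theorem bRun_spec (cs : List Char) (s j : Nat) (hsj : s ≤ j) :
    ∃ k : Nat, bRun cs (s : Int) (j : Int) = (k : Int) ∧ s ≤ k ∧ k ≤ j ∧
      (∀ i : Nat, k ≤ i → i < j → cs[i]? = some '\\') ∧
      (k = s ∨ cs[k - 1]? ≠ some '\\') := by
  by_cases hse : s = j
  · refine ⟨j, ?_, by omega, le_rfl, by omega, Or.inl hse.symm⟩
    rw [bRun_stop _ _ _ (by omega)]
  · have hlt : s < j := by omega
    by_cases hbs : PySem.List.pyGet? cs ((j : Int) - 1) = some '\\'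
    · have hrw : bRun cs (s : Int) (j : Int) = bRun cs (s : Int) ((j : Int) - 1) := by
        rw [bRun_step _ _ _ (by omega), if_pos hbs]
      have hcast : ((j : Int) - 1) = ((j - 1 : Nat) : Int) := by omega
      rw [hcast] at hrw
      obtain ⟨k, hk, h1, h2, h3, h4⟩ := bRun_spec cs s (j - 1) (by omega)
      refine ⟨k, by rw [hrw]; exact hk, h1, by omega, ?_, h4⟩
      intro i hi1 hi2
      by_cases hij : i < j - 1
      · exact h3 i hi1 hij
      · have : i = j - 1 := by omega
        subst this
        rw [hcast] at hbs
        simpa [PySem.List.pyGet?_natCast] using hbs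
    · refine ⟨j, ?_, by omega, le_rfl, by omega, Or.inr ?_⟩
      · rw [bRun_step _ _ _ (by omega), if_neg hbs]
      · intro hc
        apply hbs
        have hcast : ((j : Int) - 1) = ((j - 1 : Nat) : Int) := by omega
        rw [hcast]
        simpa [PySem.List.pyGet?_natCast] using hc
termination_by j - s

-- findFrom over [q] from a Nat start: either no quote remains, or it returns the first one
theorem findFrom_nat (cs : List Char) (q : Char) (s : Nat) (hs : s ≤ cs.length) :
    (PySem.Chars.findFrom cs [q] (s : Int) none = -1 ∧
      ∀ i : Nat, s ≤ i → i < cs.length → cs[i]? ≠ some q) ∨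
    (∃ j : Nat, PySem.Chars.findFrom cs [q] (s : Int) none = (j : Int) ∧ s ≤ j ∧ j < cs.length ∧
      cs[j]? = some q ∧ ∀ i : Nat, s ≤ i → i < j → cs[i]? ≠ some q) := by
  have heq : PySem.Chars.findFrom cs [q] (s : Int) none =
      (if (cs.length : Int) < (if (s : Int) < 0 then if (s : Int) + (cs.length : Int) < 0 then 0 else (s : Int) + (cs.length : Int) else (s : Int)) then -1
       else
        if PySem.Chars.find (List.drop ((if (s : Int) < 0 then if (s : Int) + (cs.length : Int) < 0 then 0 else (s : Int) + (cs.length : Int) else (s : Int))).toNat (List.take ((cs.length : Int)).toNat cs)) [q] = -1 then -1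
        else (if (s : Int) < 0 then if (s : Int) + (cs.length : Int) < 0 then 0 else (s : Int) + (cs.length : Int) else (s : Int)) +
          PySem.Chars.find (List.drop ((if (s : Int) < 0 then if (s : Int) + (cs.length : Int) < 0 then 0 else (s : Int) + (cs.length : Int) else (s : Int))).toNat (List.take ((cs.length : Int)).toNat cs)) [q]) := rfl
  have hnneg : ¬ ((s : Int) < 0) := by omega
  simp only [if_neg hnneg] at heq
  rw [if_neg (by omega)] at heq
  have hsimp : (List.drop ((s : Int)).toNat (List.take ((cs.length : Int)).toNat cs)) = cs.drop s := by
    simp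
  rw [hsimp] at heq
  by_cases hr : PySem.Chars.find (cs.drop s) [q] = -1
  · left
    rw [if_pos hr] at heq
    refine ⟨heq, ?_⟩
    intro i h1 h2 hc
    rw [PySem.Chars.find_eq_neg_one_iff] at hr
    apply hr
    rw [singleton_infix_iff_mem]
    have : cs[i] = q := by rw [List.getElem?_eq_getElem h2] at hc; exact Option.some.inj hc
    have hgq : (cs.drop s)[i - s]? = cs[i]? := by rw [List.getElem?_drop]; congr 1; omega
    exact List.mem_of_getElem? (hgq.trans (by rw [List.getElem?_eq_getElem h2, this]))
  · right
    rw [if_neg hr] at heq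
    have hr0 : 0 ≤ PySem.Chars.find (cs.drop s) [q] := by
      have := PySem.Chars.neg_one_le_find (cs.drop s) [q]
      omega
    have hspec := PySem.Chars.find_spec (s := cs.drop s) (sub := [q]) hr0
    set r : Nat := (PySem.Chars.find (cs.drop s) [q]).toNat with hrdef
    refine ⟨s + r, ?_, by omega, ?_, ?_, ?_⟩
    · rw [heq]; push_cast; omega
    · rcases hspec.1 with ⟨t, ht⟩
      have h2 := congrArg List.length ht
      simp at h2
      omega
    · have h1 := hspec.1
      rw [List.drop_drop, singleton_prefix_iff_getElem, List.getElem?_drop] at h1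
      convert h1 using 2
      try omega
    · intro i h1 h2 hc
      have := hspec.2 (i - s) (by omega)
      apply this
      rw [List.drop_drop, singleton_prefix_iff_getElem, List.getElem?_drop]
      convert hc using 2
      omega

-- findFrom from a start past the end is -1
theorem findFrom_past (cs : List Char) (q : Char) (s : Nat) (hs : cs.length < s) :
    PySem.Chars.findFrom cs [q] (s : Int) none = -1 := by
  have heq : PySem.Chars.findFrom cs [q] (s : Int) none =
      (if (cs.length : Int) < (if (s : Int) < 0 then if (s : Int) + (cs.length : Int) < 0 then 0 else (s : Int) + (cs.length : Int) else (s : Int)) then -1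
       else
        if PySem.Chars.find (List.drop ((if (s : Int) < 0 then if (s : Int) + (cs.length : Int) < 0 then 0 else (s : Int) + (cs.length : Int) else (s : Int))).toNat (List.take ((cs.length : Int)).toNat cs)) [q] = -1 then -1
        else (if (s : Int) < 0 then if (s : Int) + (cs.length : Int) < 0 then 0 else (s : Int) + (cs.length : Int) else (s : Int)) +
          PySem.Chars.find (List.drop ((if (s : Int) < 0 then if (s : Int) + (cs.length : Int) < 0 then 0 else (s : Int) + (cs.length : Int) else (s : Int))).toNat (List.take ((cs.length : Int)).toNat cs)) [q]) := rfl
  have hnneg : ¬ ((s : Int) < 0) := by omega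
  simp only [if_neg hnneg] at heq
  rw [if_pos (by omega)] at heq
  exact heq

-- findFrom from an Int start past the end is -1
theorem findFrom_past_int (cs : List Char) (q : Char) (pos : Int) (hs : (cs.length : Int) < pos) :
    PySem.Chars.findFrom cs [q] pos none = -1 := by
  have hp : pos = ((pos.toNat : Nat) : Int) := by omega
  rw [hp]
  exact findFrom_past cs q pos.toNat (by omega)

theorem bFindGo_fuel (cs : List Char) (q : Char) :
    ∀ (f1 f2 : Nat) (pos : Int), ((cs.length : Int) + 1 - pos).toNat ≤ f1 →
    ((cs.length : Int) + 1 - pos).toNat ≤ f2 → bFindGo cs q f1 pos = bFindGo cs q f2 pos := by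
  intro f1
  induction f1 with
  | zero =>
    intro f2 pos h1 h2
    have hm : PySem.Chars.findFrom cs [q] pos none = -1 := findFrom_past_int cs q pos (by omega)
    rw [bFindGo_none _ _ _ hm, bFindGo_none _ _ _ hm]
  | succ f ih =>
    intro f2 pos h1 h2
    by_cases hm : PySem.Chars.findFrom cs [q] pos none = -1
    · rw [bFindGo_none _ _ _ hm, bFindGo_none _ _ _ hm]
    · have hb := findFrom_single_bounds cs q pos hm
      cases f2 with
      | zero => omega
      | succ g =>
        simp only [bFindGo]
        rw [if_neg hm, if_neg hm]
        by_cases hpar : PySem.Int.mod (PySem.Chars.findFrom cs [q] pos none - bRun cs pos (PySem.Chars.findFrom cs [q] pos none)) 2 = 0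
        · rw [if_pos hpar, if_pos hpar]
        · rw [if_neg hpar, if_neg hpar]
          exact ih g (PySem.Chars.findFrom cs [q] pos none + 1) (by omega) (by omega)

theorem bFind_none (cs : List Char) (q : Char) (pos : Int)
    (h : PySem.Chars.findFrom cs [q] pos none = -1) : bFindLoop cs q pos = none := by
  unfold bFindLoop; exact bFindGo_none cs q pos h _

theorem bFind_step (cs : List Char) (q : Char) (pos : Int)
    (h : ¬ PySem.Chars.findFrom cs [q] pos none = -1) :
    bFindLoop cs q pos =
      (if PySem.Int.mod (PySem.Chars.findFrom cs [q] pos none - bRun cs pos (PySem.Chars.findFrom cs [q] pos none)) 2 = 0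
       then some (PySem.Chars.findFrom cs [q] pos none)
       else bFindLoop cs q (PySem.Chars.findFrom cs [q] pos none + 1)) := by
  have hb := findFrom_single_bounds cs q pos h
  unfold bFindLoop
  obtain ⟨f, hf⟩ : ∃ f, ((cs.length : Int) + 1 - pos).toNat = f + 1 :=
    ⟨((cs.length : Int) - pos).toNat, by omega⟩
  rw [hf]
  simp only [bFindGo]
  rw [if_neg h]
  by_cases hpar : PySem.Int.mod (PySem.Chars.findFrom cs [q] pos none - bRun cs pos (PySem.Chars.findFrom cs [q] pos none)) 2 = 0
  · rw [if_pos hpar, if_pos hpar]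
  · rw [if_neg hpar, if_neg hpar]
    exact bFindGo_fuel cs q f (((cs.length : Int) + 1 - (PySem.Chars.findFrom cs [q] pos none + 1)).toNat)
      (PySem.Chars.findFrom cs [q] pos none + 1) (by omega) (by omega)

-- the heart of the file: A's scan and B's find-and-count loop agree from any nonnegative start
theorem main_equiv (cs : List Char) (q : Char) (hq : q ≠ '\\') :
    ∀ (n : Nat) (s : Nat), cs.length + 1 - s ≤ n →
    (if (cs.length : Int) ≤ aScanLoop cs q (s : Int) then (none : Option Int)
     else some (aScanLoop cs q (s : Int))) = bFindLoop cs q (s : Int) := by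
  intro n
  induction n with
  | zero =>
    intro s hs
    rw [aScan_stop _ _ _ (by omega), if_pos (by omega)]
    rw [bFind_none cs q _ (findFrom_past cs q s (by omega))]
  | succ n ih =>
    intro s hs
    by_cases hsl : cs.length < s
    · rw [aScan_stop _ _ _ (by omega), if_pos (by omega)]
      rw [bFind_none cs q _ (findFrom_past cs q s hsl)]
    · have hs' : s ≤ cs.length := by omega
      rcases findFrom_nat cs q s hs' with ⟨hm1, hnq⟩ | ⟨j, hj, hsj, hjl, hjq, hjnq⟩
      · rw [if_pos (aScan_noquote cs q s hnq)]
        rw [bFind_none cs q _ hm1]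
      · obtain ⟨k, hk, hks, hkj, hbs, hlast⟩ := bRun_spec cs s j hsj
        have hreach : aScanLoop cs q (s : Int) = aScanLoop cs q (k : Int) :=
          aScan_reach cs q s k hks (by omega) (fun i h1 h2 => hjnq i h1 (by omega)) hlast
        have hrun := aScan_run cs q hq k j hkj hbs hjq
        have hmod : PySem.Int.mod ((j : Int) - (k : Int)) 2 = (((j - k) % 2 : Nat) : Int) := by
          rw [PySem.Int.mod_eq_emod_of_pos (by omega : (0:Int) < 2)]
          omega
        rw [bFind_step cs q _ (by rw [hj]; omega)]
        simp only [hj, hk, hmod]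
        by_cases hpar : (j - k) % 2 = 0
        · rw [if_pos hpar] at hrun
          have hA : aScanLoop cs q (s : Int) = (j : Int) := hreach.trans hrun
          rw [hA]
          rw [if_neg (by omega)]
          rw [if_pos (show (((j - k) % 2 : Nat) : Int) = 0 from by rw [hpar]; rfl)]
        · rw [if_neg (show ¬ ((((j - k) % 2 : Nat) : Int) = 0) from by omega)]
          rw [if_neg hpar] at hrun
          have hA : aScanLoop cs q (s : Int) = aScanLoop cs q ((j : Int) + 1) := hreach.trans hrun
          rw [hA]
          have hcast : ((j : Int) + 1) = ((j + 1 : Nat) : Int) := by push_cast; ring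
          rw [hcast]
          exact ih (j + 1) (by omega)

-- ===== VERDICT (by name: the statement is the Claim_ definition above) =====
theorem attempt_scan_chars_py_spec : Claim_equal_attempt_scan_chars_py := by
  intro line offset hdom hpre
  unfold Pre_attempt_scan_chars_py at hpre
  unfold Spec_attempt_scan_chars_py attempt_scan_chars_py attempt_scan_chars_py_alt
  cases hg : PySem.Str.pyGet? line offset with
  | none =>
    exfalso
    rw [PySem.Str.pyGet?_eq, PySem.Chars.pyGet?_eq_listPyGet?, PySem.List.pyGet?_eq_none_iff] at hg
    exact hg hpre.1
  | some c =>
    simp only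
    by_cases hcq : c = '"' ∨ c = '\''
    · rw [if_neg (not_not_intro hcq), if_neg (not_not_intro hcq)]
      have hofs : offset + 1 = (((offset + 1).toNat : Nat) : Int) := by omega
      rw [hofs]
      have hqbs : c ≠ '\\' := by rcases hcq with h | h <;> rw [h] <;> decide
      exact main_equiv line.toList c hqbs (line.toList.length + 1) (offset + 1).toNat (by omega)
    · rw [if_pos hcq, if_pos hcq]
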